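-- pv_equiv track=rewrite | github.com/loveAlakazam/google_Kickstart | 2017_G/B_cardsGame_incorrect.py | xor_total
-- ===== SOURCE A (Python) =====
-- def xor_total(n,redNumber,blueNumber):
--     #n=cardsNum-1
--     #xor_case는 서로 다른 카드가 xor연산 한 모든 결과들을 나타낸다..
--     xor_case=[]
--
--     #연산결과의 리스트를 만든다.
--     for r in range(len(redNumber)):
--         for b in range(len(blueNumber)):
--             if r !=b:
--                 xor_case.append(redNumber[r]^blueNumber[b])
--
--     #연산결과의 리스트에서 cardNumber-1개를 뽑아서 최소의 합을 만든다.
--     min_total=0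
--     for i in range(n):#최소의 원소를 고르는 횟수(cardsNum-1)
--         min_total+= min(xor_case)
--         xor_case.remove(min(xor_case))
--
--     return min_total
-- ===== SOURCE B (Python) =====
-- def xor_total(n, redNumber, blueNumber):
--     # sort-then-take: sum of the n smallest XOR values of pairs at distinct indices
--     xor_case = sorted(r ^ b
--                       for i, r in enumerate(redNumber)
--                       for j, b in enumerate(blueNumber)
--                       if i != j)
--     return sum(xor_case[: max(n, 0)])
-- ===== Notes on version B (the rewrite author's own statement) =====
-- stated objective: alternative
-- what changed: A repeatedly scans the pair list for its minimum and removes it, n times; B builds the pair list with an enumerate comprehension, sorts it once, and sums the first n entries.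
import Mathlib
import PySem

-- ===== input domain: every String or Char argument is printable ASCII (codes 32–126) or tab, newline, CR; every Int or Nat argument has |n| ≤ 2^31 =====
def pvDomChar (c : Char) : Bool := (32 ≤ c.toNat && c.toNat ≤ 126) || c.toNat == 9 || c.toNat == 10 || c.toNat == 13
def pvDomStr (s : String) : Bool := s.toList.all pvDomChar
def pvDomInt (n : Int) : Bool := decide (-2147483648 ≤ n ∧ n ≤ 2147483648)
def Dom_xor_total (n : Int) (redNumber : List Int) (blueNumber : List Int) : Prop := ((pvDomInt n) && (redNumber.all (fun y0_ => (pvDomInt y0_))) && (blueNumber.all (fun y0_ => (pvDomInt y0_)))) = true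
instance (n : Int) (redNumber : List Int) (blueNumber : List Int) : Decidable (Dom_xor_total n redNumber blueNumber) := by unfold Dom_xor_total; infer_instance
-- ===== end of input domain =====

-- B replaces A's n rounds of "scan for the min, then remove it" by sorting the pair list once
-- and summing its first n entries (return value only; no argument of the caller is mutated).

-- ===== PORT A =====
-- the two nested index loops building xor_case
def xorCaseA (redNumber : List Int) (blueNumber : List Int) : List Int :=
  (PySem.List.pyRange 0 (PySem.List.len redNumber) 1).foldl (fun acc r =>
    (PySem.List.pyRange 0 (PySem.List.len blueNumber) 1).foldl (fun acc2 b =>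
      if r ≠ b then
        acc2 ++ [PySem.Int.bxor (PySem.List.pyGetD redNumber r 0) (PySem.List.pyGetD blueNumber b 0)]
      else acc2) acc) []

-- the selection loop: n times, add min(xor_case) and remove its first occurrence
-- (Python raises ValueError on min([]); the none branches keep the state — excluded by Pre_)
def selectA : Nat → Int × List Int → Int × List Int
  | 0, st => st
  | k+1, (total, xs) =>
    match PySem.List.min? xs (fun x => x) with
    | none => (total, xs)
    | some m =>
      match PySem.List.remove? xs m with
      | none => (total + m, xs)
      | some xs' => selectA k (total + m, xs')

def xor_total (n : Int) (redNumber : List Int) (blueNumber : List Int) : Int :=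
  (selectA n.toNat (0, xorCaseA redNumber blueNumber)).1

-- ===== PORT B =====
-- sorted(r ^ b for i, r in enumerate(redNumber) for j, b in enumerate(blueNumber) if i != j)
def xorCaseB (redNumber : List Int) (blueNumber : List Int) : List Int :=
  PySem.List.sorted
    ((PySem.List.enumerate redNumber).flatMap (fun ir =>
      ((PySem.List.enumerate blueNumber).filter (fun jb => decide (ir.1 ≠ jb.1))).map
        (fun jb => PySem.Int.bxor ir.2 jb.2)))
    (fun x => x) false

def xor_total_alt (n : Int) (redNumber : List Int) (blueNumber : List Int) : Int :=
  (PySem.List.slice (xorCaseB redNumber blueNumber) none (some (max n 0))).sum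

-- ===== PRECONDITION & SPEC =====
-- Pre_ excludes exactly the inputs where A raises ValueError (min of an empty list):
-- n must not exceed the number of index pairs (r, b) with r ≠ b.
def Pre_xor_total (n : Int) (redNumber : List Int) (blueNumber : List Int) : Prop :=
  n ≤ (redNumber.length * blueNumber.length - min redNumber.length blueNumber.length : Int)
instance (n : Int) (redNumber : List Int) (blueNumber : List Int) : Decidable (Pre_xor_total n redNumber blueNumber) := by unfold Pre_xor_total; infer_instance

def pvWitness_xor_total : Int × List Int × List Int := (2, [1, 2], [3, 5])

def Spec_xor_total (n : Int) (redNumber : List Int) (blueNumber : List Int) (out : Int) : Prop := out = xor_total_alt n redNumber blueNumber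
instance (n : Int) (redNumber : List Int) (blueNumber : List Int) (out : Int) : Decidable (Spec_xor_total n redNumber blueNumber out) := by unfold Spec_xor_total; infer_instance

-- ===== CLAIM (what is proved, stated in full; the proofs are below) =====
def Claim_equal_xor_total : Prop := ∀ (n : Int) (redNumber : List Int) (blueNumber : List Int), Dom_xor_total n redNumber blueNumber → Pre_xor_total n redNumber blueNumber → Spec_xor_total n redNumber blueNumber (xor_total n redNumber blueNumber)

-- ===== LEMMAS AND PROOFS =====

-- both ports build the same raw pair list
theorem xorCase_eq (red blue : List Int) :
    xorCaseA red blue =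
      (PySem.List.enumerate red).flatMap (fun ir =>
        ((PySem.List.enumerate blue).filter (fun jb => decide (ir.1 ≠ jb.1))).map
          (fun jb => PySem.Int.bxor ir.2 jb.2)) := by
  unfold xorCaseA
  rw [PySem.List.enumerate_eq_map_pyRange red 0, PySem.List.enumerate_eq_map_pyRange blue 0]
  simp only [List.flatMap_map, List.filter_map, List.map_map, Function.comp_def]
  rw [show (fun acc r =>
      (PySem.List.pyRange 0 (PySem.List.len blue) 1).foldl (fun acc2 b =>
        if r ≠ b then acc2 ++ [PySem.Int.bxor (PySem.List.pyGetD red r 0) (PySem.List.pyGetD blue b 0)] else acc2) acc)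
    = (fun (acc : List Int) r => acc ++
        ((PySem.List.pyRange 0 (PySem.List.len blue) 1).filter (fun b => decide (r ≠ b))).map
          (fun b => PySem.Int.bxor (PySem.List.pyGetD red r 0) (PySem.List.pyGetD blue b 0)))
    from funext fun acc => funext fun r => PySem.List.foldl_append_ite _ _ _ _]
  rw [PySem.List.foldl_append_eq_flatMap]
  simp

-- the sorted list of a nonempty xs starts with its minimum
theorem sorted_cons_min (xs : List Int) (m : Int)
    (hm : PySem.List.min? xs (fun x => x) = some m) :
    PySem.List.sorted xs (fun x => x) false =
      m :: PySem.List.sorted (xs.erase m) (fun x => x) false := by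
  have hmem : m ∈ xs := PySem.List.min?_mem hm
  have hmin : ∀ y ∈ xs, m ≤ y := PySem.List.min?_isMin hm
  apply List.eq_of_perm_of_sorted (le := fun a b => a ≤ b)
    (fun a b _ _ h1 h2 => le_antisymm h1 h2)
  · exact PySem.List.sorted_pairwise xs _
  · refine List.pairwise_cons.mpr ⟨?_, PySem.List.sorted_pairwise _ _⟩
    intro y hy
    exact hmin y (List.mem_of_mem_erase ((PySem.List.mem_sorted _ _ _ y).mp hy))
  · exact (PySem.List.sorted_perm xs _ _).trans
      ((List.perm_cons_erase hmem).trans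
        (List.Perm.cons m (PySem.List.sorted_perm _ _ _).symm)).symm.symm

-- the selection loop computes the sum of the k smallest elements
theorem selectA_eq (k : Nat) (xs : List Int) (t : Int) (h : k ≤ xs.length) :
    (selectA k (t, xs)).1 =
      t + ((PySem.List.sorted xs (fun x => x) false).take k).sum := by
  induction k generalizing xs t with
  | zero => simp [selectA]
  | succ k ih =>
    have hne : xs ≠ [] := by intro e; subst e; simp at h
    obtain ⟨m, hm⟩ : ∃ m, PySem.List.min? xs (fun x => x) = some m := by
      cases hmin : PySem.List.min? xs (fun x => x) with
      | none => exact absurd ((PySem.List.min?_eq_none_iff xs _).mp hmin) hne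
      | some m => exact ⟨m, rfl⟩
    have hmem : m ∈ xs := PySem.List.min?_mem hm
    have hrem := PySem.List.remove?_eq_some_erase xs m hmem
    simp only [selectA, hm, hrem]
    have hlen : k ≤ (xs.erase m).length := by
      rw [List.length_erase_of_mem hmem]; omega
    rw [ih _ _ hlen, sorted_cons_min xs m hm]
    simp [add_assoc]

theorem filt_len (l : List Int) (v : Int) :
    (l.filter (fun j => decide (v ≠ j))).length = l.length - l.count v := by
  simp only [ne_eq, decide_not]
  induction l with
  | nil => simp
  | cons h t ih =>
    have hc : t.count v ≤ t.length := List.count_le_length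
    by_cases hv : v = h
    · subst hv; simp [ih]
    · simp [List.filter_cons, hv, List.count_cons, Ne.symm hv, ih]
      omega

theorem len_aux (R B : Nat) (g : Int → Int → Int) :
    ((PySem.List.pyRange 0 (R : Int) 1).flatMap (fun i =>
      ((PySem.List.pyRange 0 (B : Int) 1).filter (fun j => decide (i ≠ j))).map (g i))).length
    = R * B - min R B := by
  induction R with
  | zero => simp [PySem.List.pyRange_one_eq_nil]
  | succ R ih =>
    rw [show ((R + 1 : Nat) : Int) = (R : Int) + 1 by push_cast; ring,
      PySem.List.pyRange_one_succ_right (by positivity), List.flatMap_append]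
    have hcount : (PySem.List.pyRange 0 (B : Int) 1).count (R : Int)
        = if R < B then 1 else 0 := by
      split_ifs with hlt
      · exact List.count_eq_one_of_mem (PySem.List.nodup_pyRange_one _ _)
          ((PySem.List.mem_pyRange_one).mpr (by constructor <;> omega))
      · rw [List.count_eq_zero]
        intro hmem
        have := (PySem.List.mem_pyRange_one).mp hmem
        omega
    have hlenB : (PySem.List.pyRange 0 (B : Int) 1).length = B := by
      rw [PySem.List.length_pyRange_one]; omega
    have hblock := filt_len (PySem.List.pyRange 0 (B : Int) 1) (R : Int)
    rw [hcount, hlenB] at hblock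
    simp only [List.length_append, ih, List.flatMap_cons, List.flatMap_nil,
      List.append_nil, List.length_map, hblock, Nat.succ_mul]
    by_cases hlt : R < B
    · rw [if_pos hlt]
      have h1 : R ≤ R * B := Nat.le_mul_of_pos_right R (by omega)
      have hmin1 : min R B = R := by omega
      have hmin2 : min (R + 1) B = R + 1 := by omega
      rw [hmin1, hmin2]; omega
    · rw [if_neg hlt]
      have h1 : B ≤ R * B ∨ R = 0 := by
        rcases Nat.eq_zero_or_pos R with h | h
        · right; exact h
        · left; exact Nat.le_mul_of_pos_left B h
      have hmin1 : min R B = B := by omega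
      have hmin2 : min (R + 1) B = B := by omega
      rw [hmin1, hmin2]; omega

theorem len_xorCase (red blue : List Int) :
    (xorCaseA red blue).length =
      red.length * blue.length - min red.length blue.length := by
  rw [xorCase_eq, PySem.List.enumerate_eq_map_pyRange red 0,
    PySem.List.enumerate_eq_map_pyRange blue 0]
  simp only [List.flatMap_map, List.filter_map, List.map_map, Function.comp_def]
  simpa using len_aux red.length blue.length
    (fun i j => PySem.Int.bxor (PySem.List.pyGetD red i 0) (PySem.List.pyGetD blue j 0))

-- ===== VERDICT (by name: the statement is the Claim_ definition above) =====
theorem xor_total_spec : Claim_equal_xor_total := by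
  intro n red blue _ hpre
  unfold Spec_xor_total xor_total xor_total_alt xorCaseB
  rw [PySem.List.slice_to _ (le_max_right n 0)]
  have hnt : (max n 0).toNat = n.toNat := by omega
  rw [hnt, ← xorCase_eq]
  have hlen := len_xorCase red blue
  unfold Pre_xor_total at hpre
  have h : n.toNat ≤ (xorCaseA red blue).length := by omega
  rw [selectA_eq _ _ _ h]
  ring
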